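-- pv_equiv track=rewrite | github.com/ryanang333/UBSCodingChallenge24 | app.py | find_dodge_instructions
-- ===== SOURCE A (Python) =====
-- def find_dodge_instructions(map_string):
--     lines = map_string.splitlines()
--     player_position = None
--     bullets = []
--
--     # Locate player position and bullets
--     for y, line in enumerate(lines):
--         for x, char in enumerate(line):
--             if char == '*':
--                 player_position = (x, y)
--             elif char in 'udrl':
--                 bullets.append((x, y, char))  # (x, y, direction)
--
--     if player_position is None:
--         return None
--
--     # Possible moves from current player position
--     possible_moves = {
--         'u': (0, -1),
--         'd': (0, 1),
--         'l': (-1, 0),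
--         'r': (1, 0)
--     }
--
--     # Check each move and simulate bullet movement
--     safe_moves = []
--     for direction, (dx, dy) in possible_moves.items():
--         new_x = player_position[0] + dx
--         new_y = player_position[1] + dy
--
--         # Check if the move is within map boundaries
--         if 0 <= new_x < len(lines[0]) and 0 <= new_y < len(lines):
--             # Simulate bullet movement and check if the new position is safe
--             if not will_bullet_hit(new_x, new_y, bullets, len(lines), len(lines[0])):
--                 safe_moves.append(direction)
--
--     return safe_moves if safe_moves else None
--
-- def will_bullet_hit(new_x, new_y, bullets, max_y, max_x):
--     # Check if the new position will be hit by any bullet after movement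
--     for bullet_x, bullet_y, direction in bullets:
--         # Simulate the next position of the bullet based on its direction
--         if direction == 'u':
--             bullet_y = (bullet_y - 1) % max_y
--         elif direction == 'd':
--             bullet_y = (bullet_y + 1) % max_y
--         elif direction == 'l':
--             bullet_x = (bullet_x - 1) % max_x
--         elif direction == 'r':
--             bullet_x = (bullet_x + 1) % max_x
--
--         # Check if the bullet's new position overlaps with the player's new position
--         if bullet_x == new_x and bullet_y == new_y:
--             return True
--
--     return False
-- ===== SOURCE B (Python) =====
-- def find_dodge_instructions(map_string):
--     lines = map_string.splitlines()
--     max_y = len(lines)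
--     max_x = len(lines[0]) if lines else 0
--     player = None
--     hit = set()  # next positions of all bullets, built in one pass
--     for y, line in enumerate(lines):
--         for x, ch in enumerate(line):
--             if ch == '*':
--                 player = (x, y)
--             elif ch == 'u':
--                 hit.add((x, (y - 1) % max_y))
--             elif ch == 'd':
--                 hit.add((x, (y + 1) % max_y))
--             elif ch in 'lr' and max_x:
--                 hit.add(((x + (1 if ch == 'r' else -1)) % max_x, y))
--     if player is None:
--         return None
--     px, py = player
--     safe = [d for d, (nx, ny) in (('u', (px, py - 1)), ('d', (px, py + 1)),
--                                   ('l', (px - 1, py)), ('r', (px + 1, py)))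
--             if 0 <= nx < max_x and 0 <= ny < max_y and (nx, ny) not in hit]
--     return safe or None
-- ===== Notes on version B (the rewrite author's own statement) =====
-- stated objective: simpler
-- what changed: B precomputes the set of next bullet positions in the same single map scan that finds the player, so the per-move will_bullet_hit rescan of the bullet list disappears; safe moves are then a comprehension with one set lookup per move.
import Mathlib
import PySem

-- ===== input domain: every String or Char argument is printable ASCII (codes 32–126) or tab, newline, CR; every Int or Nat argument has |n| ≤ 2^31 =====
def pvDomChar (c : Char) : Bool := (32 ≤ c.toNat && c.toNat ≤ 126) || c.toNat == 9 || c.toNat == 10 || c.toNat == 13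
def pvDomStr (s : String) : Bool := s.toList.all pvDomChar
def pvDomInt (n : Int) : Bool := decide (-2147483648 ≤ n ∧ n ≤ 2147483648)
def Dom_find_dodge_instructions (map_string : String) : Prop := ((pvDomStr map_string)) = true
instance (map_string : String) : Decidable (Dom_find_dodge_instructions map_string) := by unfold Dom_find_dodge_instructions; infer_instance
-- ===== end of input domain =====

-- B replaces A's per-move rescan of the bullet list by a set of next bullet
-- positions built in the same single scan that locates the player (objective: simpler).

-- ===== PORT A =====
-- helper will_bullet_hit, literal recursion over the bullet list
def will_bullet_hit (new_x new_y : Int) (bullets : List (Int × Int × Char))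
    (max_y max_x : Int) : Bool :=
  match bullets with
  | [] => false
  | (bx, by0, d) :: rest =>
    let p : Int × Int :=
      if d = 'u' then (bx, PySem.Int.mod (by0 - 1) max_y)
      else if d = 'd' then (bx, PySem.Int.mod (by0 + 1) max_y)
      else if d = 'l' then (PySem.Int.mod (bx - 1) max_x, by0)
      else if d = 'r' then (PySem.Int.mod (bx + 1) max_x, by0)
      else (bx, by0)
    if p.1 = new_x ∧ p.2 = new_y then true
    else will_bullet_hit new_x new_y rest max_y max_x

def find_dodge_instructions (map_string : String) : Option (List String) :=
  let lines := PySem.Str.splitlines map_string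
  -- the locate scan: state = (player_position, bullets); "char in 'udrl'" is the four-way equality test
  let st : Option (Int × Int) × List (Int × Int × Char) :=
    (PySem.List.enumerate lines 0).foldl (fun st yl =>
      (PySem.List.enumerate yl.2.toList 0).foldl (fun st xc =>
        if xc.2 = '*' then (some (xc.1, yl.1), st.2)
        else if xc.2 = 'u' ∨ xc.2 = 'd' ∨ xc.2 = 'r' ∨ xc.2 = 'l' then
          (st.1, st.2 ++ [(xc.1, yl.1, xc.2)])
        else st) st) (none, [])
  match st.1 with
  | none => none
  | some pp =>
    -- lines[0]: reachable only with lines ≠ [] (a player was found), so getD "" is exact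
    let maxX : Int := PySem.Str.len ((PySem.List.pyGet? lines 0).getD "")
    let maxY : Int := lines.length
    let moves : List (String × Int × Int) :=
      [("u", 0, -1), ("d", 0, 1), ("l", -1, 0), ("r", 1, 0)]
    let safe := moves.foldl (fun acc m =>
      let nx := pp.1 + m.2.1
      let ny := pp.2 + m.2.2
      if 0 ≤ nx ∧ nx < maxX ∧ 0 ≤ ny ∧ ny < maxY then
        if will_bullet_hit nx ny st.2 maxY maxX then acc else acc ++ [m.1]
      else acc) []
    if safe = [] then none else some safe

-- ===== PORT B =====
def find_dodge_instructions_alt (map_string : String) : Option (List String) :=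
  let lines := PySem.Str.splitlines map_string
  let maxY : Int := lines.length
  let maxX : Int := if lines.isEmpty then 0 else PySem.Str.len (lines.headD "")
  -- one pass: player and the set of next bullet positions
  let st : Option (Int × Int) × PySem.Set (Int × Int) :=
    (PySem.List.enumerate lines 0).foldl (fun st yl =>
      (PySem.List.enumerate yl.2.toList 0).foldl (fun st xc =>
        if xc.2 = '*' then (some (xc.1, yl.1), st.2)
        else if xc.2 = 'u' then (st.1, PySem.Set.add st.2 (xc.1, PySem.Int.mod (yl.1 - 1) maxY))
        else if xc.2 = 'd' then (st.1, PySem.Set.add st.2 (xc.1, PySem.Int.mod (yl.1 + 1) maxY))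
        else if (xc.2 = 'l' ∨ xc.2 = 'r') ∧ maxX ≠ 0 then
          (st.1, PySem.Set.add st.2
            (PySem.Int.mod (xc.1 + (if xc.2 = 'r' then 1 else -1)) maxX, yl.1))
        else st) st) (none, PySem.Set.empty)
  match st.1 with
  | none => none
  | some pp =>
    let cands : List (String × Int × Int) :=
      [("u", pp.1, pp.2 - 1), ("d", pp.1, pp.2 + 1), ("l", pp.1 - 1, pp.2), ("r", pp.1 + 1, pp.2)]
    let safe := (cands.filter (fun c =>
        decide (0 ≤ c.2.1) && decide (c.2.1 < maxX) && decide (0 ≤ c.2.2) && decide (c.2.2 < maxY)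
          && !(PySem.Set.contains st.2 (c.2.1, c.2.2)))).map (·.1)
    if safe = [] then none else some safe

-- ===== PRECONDITION & SPEC =====
def Spec_find_dodge_instructions (map_string : String) (out : Option (List String)) : Prop := out = find_dodge_instructions_alt map_string
instance (map_string : String) (out : Option (List String)) : Decidable (Spec_find_dodge_instructions map_string out) := by unfold Spec_find_dodge_instructions; infer_instance

-- ===== CLAIM (what is proved, stated in full; the proofs are below) =====
def Claim_equal_find_dodge_instructions : Prop := ∀ (map_string : String), Dom_find_dodge_instructions map_string → Spec_find_dodge_instructions map_string (find_dodge_instructions map_string)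

-- ===== LEMMAS AND PROOFS =====

-- next position of a bullet (A's will_bullet_hit step)
def pvNext (maxY maxX : Int) (b : Int × Int × Char) : Int × Int :=
  if b.2.2 = 'u' then (b.1, PySem.Int.mod (b.2.1 - 1) maxY)
  else if b.2.2 = 'd' then (b.1, PySem.Int.mod (b.2.1 + 1) maxY)
  else if b.2.2 = 'l' then (PySem.Int.mod (b.1 - 1) maxX, b.2.1)
  else if b.2.2 = 'r' then (PySem.Int.mod (b.1 + 1) maxX, b.2.1)
  else (b.1, b.2.1)

lemma wbh_iff (nx ny maxY maxX : Int) (bl : List (Int × Int × Char)) :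
    will_bullet_hit nx ny bl maxY maxX = true ↔ ∃ b ∈ bl, pvNext maxY maxX b = (nx, ny) := by
  induction bl with
  | nil => simp [will_bullet_hit]
  | cons b rest ih =>
    obtain ⟨bx, by0, d⟩ := b
    show (if (pvNext maxY maxX (bx, by0, d)).1 = nx ∧ (pvNext maxY maxX (bx, by0, d)).2 = ny
        then true else will_bullet_hit nx ny rest maxY maxX) = true ↔ _
    by_cases h : pvNext maxY maxX (bx, by0, d) = (nx, ny)
    · rw [if_pos ⟨by rw [h], by rw [h]⟩]
      exact iff_of_true rfl ⟨(bx, by0, d), List.mem_cons_self, h⟩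
    · have h' : ¬((pvNext maxY maxX (bx, by0, d)).1 = nx ∧ (pvNext maxY maxX (bx, by0, d)).2 = ny) :=
        fun hc => h (Prod.ext hc.1 hc.2)
      rw [if_neg h', ih]
      constructor
      · rintro ⟨b, hb, hb2⟩; exact ⟨b, List.mem_cons_of_mem _ hb, hb2⟩
      · rintro ⟨b, hb, hb2⟩
        rcases List.mem_cons.mp hb with rfl | hb
        · exact absurd hb2 h
        · exact ⟨b, hb, hb2⟩

-- pairwise foldl preservation
lemma foldl_rel {α β γ : Type} (R : α → β → Prop) (f : α → γ → α) (g : β → γ → β)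
    (h : ∀ a b x, R a b → R (f a x) (g b x)) :
    ∀ (l : List γ) (a : α) (b : β), R a b → R (l.foldl f a) (l.foldl g b) := by
  intro l
  induction l with
  | nil => intro a b hab; exact hab
  | cons x xs ih => intro a b hab; exact ih _ _ (h a b x hab)

-- the scan invariant: players equal; when maxX ≠ 0 the hit set holds exactly the next bullet positions
def pvInv (maxY maxX : Int) (sa : Option (Int × Int) × List (Int × Int × Char))
    (sb : Option (Int × Int) × PySem.Set (Int × Int)) : Prop :=
  sa.1 = sb.1 ∧ (maxX ≠ 0 → ∀ p : Int × Int, p ∈ sb.2 ↔ ∃ b ∈ sa.2, pvNext maxY maxX b = p)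

-- adding one bullet to the list and its next position to the set preserves the characterisation
lemma step_set (maxY maxX : Int) (bl : List (Int × Int × Char)) (hit : PySem.Set (Int × Int))
    (b0 : Int × Int × Char) (q : Int × Int) (hq : pvNext maxY maxX b0 = q)
    (h2 : ∀ p : Int × Int, p ∈ hit ↔ ∃ b ∈ bl, pvNext maxY maxX b = p) (p : Int × Int) :
    p ∈ PySem.Set.add hit q ↔ ∃ b ∈ bl ++ [b0], pvNext maxY maxX b = p := by
  rw [PySem.Set.mem_add, h2]
  subst hq
  constructor
  · rintro (⟨b, hb, hb2⟩ | rfl)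
    · exact ⟨b, List.mem_append_left _ hb, hb2⟩
    · exact ⟨b0, List.mem_append_right _ (List.mem_singleton_self _), rfl⟩
  · rintro ⟨b, hb, hb2⟩
    rcases List.mem_append.mp hb with h | h
    · exact Or.inl ⟨b, h, hb2⟩
    · rw [List.mem_singleton] at h; subst h; exact Or.inr hb2.symm

lemma inner_step (maxY maxX : Int) (y : Int)
    (sa : Option (Int × Int) × List (Int × Int × Char))
    (sb : Option (Int × Int) × PySem.Set (Int × Int)) (xc : Int × Char)
    (h : pvInv maxY maxX sa sb) :
    pvInv maxY maxX
      (if xc.2 = '*' then (some (xc.1, y), sa.2)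
       else if xc.2 = 'u' ∨ xc.2 = 'd' ∨ xc.2 = 'r' ∨ xc.2 = 'l' then
         (sa.1, sa.2 ++ [(xc.1, y, xc.2)])
       else sa)
      (if xc.2 = '*' then (some (xc.1, y), sb.2)
       else if xc.2 = 'u' then (sb.1, PySem.Set.add sb.2 (xc.1, PySem.Int.mod (y - 1) maxY))
       else if xc.2 = 'd' then (sb.1, PySem.Set.add sb.2 (xc.1, PySem.Int.mod (y + 1) maxY))
       else if (xc.2 = 'l' ∨ xc.2 = 'r') ∧ maxX ≠ 0 then
         (sb.1, PySem.Set.add sb.2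
           (PySem.Int.mod (xc.1 + (if xc.2 = 'r' then 1 else -1)) maxX, y))
       else sb) := by
  obtain ⟨h1, h2⟩ := h
  obtain ⟨x, ch⟩ := xc
  by_cases hs : ch = '*'
  · subst hs; exact ⟨rfl, h2⟩
  by_cases hu : ch = 'u'
  · subst hu
    exact ⟨h1, fun hmx p =>
      step_set maxY maxX sa.2 sb.2 (x, y, 'u') (x, PySem.Int.mod (y - 1) maxY) rfl (h2 hmx) p⟩
  by_cases hd : ch = 'd'
  · subst hd
    exact ⟨h1, fun hmx p =>
      step_set maxY maxX sa.2 sb.2 (x, y, 'd') (x, PySem.Int.mod (y + 1) maxY) rfl (h2 hmx) p⟩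
  by_cases hl : ch = 'l'
  · subst hl
    by_cases hmx0 : maxX = 0
    · refine ⟨?_, fun hmx => absurd hmx0 hmx⟩
      simp [hmx0, h1]
    · refine ⟨?_, fun hmx p => ?_⟩
      · show sa.1 = (if (('l' = 'l' ∨ 'l' = 'r') ∧ maxX ≠ 0) then
            (sb.1, PySem.Set.add sb.2 (PySem.Int.mod (x + -1) maxX, y)) else sb).1
        rw [if_pos ⟨Or.inl rfl, hmx0⟩]; exact h1
      · show p ∈ (if (('l' = 'l' ∨ 'l' = 'r') ∧ maxX ≠ 0) then
            (sb.1, PySem.Set.add sb.2 (PySem.Int.mod (x + -1) maxX, y)) else sb).2 ↔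
          ∃ b ∈ sa.2 ++ [(x, y, 'l')], pvNext maxY maxX b = p
        rw [if_pos ⟨Or.inl rfl, hmx0⟩]
        exact step_set maxY maxX sa.2 sb.2 (x, y, 'l') (PySem.Int.mod (x + -1) maxX, y)
          rfl (h2 hmx) p
  by_cases hr : ch = 'r'
  · subst hr
    by_cases hmx0 : maxX = 0
    · refine ⟨?_, fun hmx => absurd hmx0 hmx⟩
      simp [hmx0, h1]
    · refine ⟨?_, fun hmx p => ?_⟩
      · show sa.1 = (if (('r' = 'l' ∨ 'r' = 'r') ∧ maxX ≠ 0) then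
            (sb.1, PySem.Set.add sb.2 (PySem.Int.mod (x + 1) maxX, y)) else sb).1
        rw [if_pos ⟨Or.inr rfl, hmx0⟩]; exact h1
      · show p ∈ (if (('r' = 'l' ∨ 'r' = 'r') ∧ maxX ≠ 0) then
            (sb.1, PySem.Set.add sb.2 (PySem.Int.mod (x + 1) maxX, y)) else sb).2 ↔
          ∃ b ∈ sa.2 ++ [(x, y, 'r')], pvNext maxY maxX b = p
        rw [if_pos ⟨Or.inr rfl, hmx0⟩]
        exact step_set maxY maxX sa.2 sb.2 (x, y, 'r') (PySem.Int.mod (x + 1) maxX, y)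
          rfl (h2 hmx) p
  · simp only [hs, hu, hd, hl, hr]
    exact ⟨h1, h2⟩

lemma maxX_eq (lines : List String) :
    PySem.Str.len ((PySem.List.pyGet? lines 0).getD "") =
      (if lines.isEmpty then (0 : Int) else PySem.Str.len (lines.headD "")) := by
  cases lines <;> simp [PySem.List.pyGet?, PySem.List.pyIdx?, PySem.Str.len]

-- one move of the final comparison: A's fold step equals B's filter-map contribution
lemma move_step (maxY maxX : Int) (bl : List (Int × Int × Char)) (hit : PySem.Set (Int × Int))
    (hinv : maxX ≠ 0 → ∀ p : Int × Int, p ∈ hit ↔ ∃ b ∈ bl, pvNext maxY maxX b = p)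
    (nm : String) (nx ny : Int) (acc : List String) :
    (if 0 ≤ nx ∧ nx < maxX ∧ 0 ≤ ny ∧ ny < maxY then
       (if will_bullet_hit nx ny bl maxY maxX then acc else acc ++ [nm]) else acc)
    = acc ++ (if (decide (0 ≤ nx) && decide (nx < maxX) && decide (0 ≤ ny) && decide (ny < maxY)
            && !(PySem.Set.contains hit (nx, ny))) = true then [nm] else []) := by
  by_cases hb : 0 ≤ nx ∧ nx < maxX ∧ 0 ≤ ny ∧ ny < maxY
  · have hmx : maxX ≠ 0 := by omega
    have hcw : PySem.Set.contains hit (nx, ny) = will_bullet_hit nx ny bl maxY maxX :=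
      Bool.eq_iff_iff.mpr (by rw [PySem.Set.contains_iff, hinv hmx, wbh_iff])
    obtain ⟨h1, h2, h3, h4⟩ := hb
    simp only [h1, h2, h3, h4, and_self, if_true, decide_true, Bool.true_and, hcw]
    cases hw : will_bullet_hit nx ny bl maxY maxX <;> simp
  · rw [if_neg hb]
    have hfalse : ((decide (0 ≤ nx) && decide (nx < maxX) && decide (0 ≤ ny) && decide (ny < maxY)
        && !(PySem.Set.contains hit (nx, ny))) = true) → False := by
      simp only [Bool.and_eq_true, decide_eq_true_eq]
      tauto
    simp only [if_neg hfalse, List.append_nil]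

-- B's comprehension as a concatenation of per-element pieces
lemma map_filter_cons {α β : Type} (p : α → Bool) (f : α → β) (x : α) (l : List α) :
    ((x :: l).filter p).map f = (if p x = true then [f x] else []) ++ (l.filter p).map f := by
  by_cases h : p x = true <;> simp [h]

-- ===== VERDICT (by name: the statement is the Claim_ definition above) =====
theorem find_dodge_instructions_spec : Claim_equal_find_dodge_instructions := by
  intro s _
  unfold Spec_find_dodge_instructions find_dodge_instructions find_dodge_instructions_alt
  simp only [maxX_eq]
  set lines := PySem.Str.splitlines s with hlines
  set maxY : Int := (lines.length : Int) with hmy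
  set maxX : Int := (if lines.isEmpty then (0 : Int) else PySem.Str.len (lines.headD "")) with hmx
  have hscan : pvInv maxY maxX
      ((PySem.List.enumerate lines 0).foldl (fun st yl =>
        (PySem.List.enumerate yl.2.toList 0).foldl (fun st xc =>
          if xc.2 = '*' then (some (xc.1, yl.1), st.2)
          else if xc.2 = 'u' ∨ xc.2 = 'd' ∨ xc.2 = 'r' ∨ xc.2 = 'l' then
            (st.1, st.2 ++ [(xc.1, yl.1, xc.2)])
          else st) st) ((none, []) : Option (Int × Int) × List (Int × Int × Char)))
      ((PySem.List.enumerate lines 0).foldl (fun st yl =>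
        (PySem.List.enumerate yl.2.toList 0).foldl (fun st xc =>
          if xc.2 = '*' then (some (xc.1, yl.1), st.2)
          else if xc.2 = 'u' then (st.1, PySem.Set.add st.2 (xc.1, PySem.Int.mod (yl.1 - 1) maxY))
          else if xc.2 = 'd' then (st.1, PySem.Set.add st.2 (xc.1, PySem.Int.mod (yl.1 + 1) maxY))
          else if (xc.2 = 'l' ∨ xc.2 = 'r') ∧ maxX ≠ 0 then
            (st.1, PySem.Set.add st.2
              (PySem.Int.mod (xc.1 + (if xc.2 = 'r' then 1 else -1)) maxX, yl.1))
          else st) st) ((none, PySem.Set.empty) : Option (Int × Int) × PySem.Set (Int × Int))) := by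
    refine foldl_rel _ _ _ ?_ _ _ _ ⟨rfl, fun _ p => by simp [PySem.Set.empty]⟩
    intro a b yl hab
    exact foldl_rel _ _ _ (fun a b xc h => inner_step maxY maxX yl.1 a b xc h) _ _ _ hab
  obtain ⟨hp, hhit⟩ := hscan
  rw [hp]
  cases hpp : ((PySem.List.enumerate lines 0).foldl (fun st yl =>
        (PySem.List.enumerate yl.2.toList 0).foldl (fun st xc =>
          if xc.2 = '*' then (some (xc.1, yl.1), st.2)
          else if xc.2 = 'u' then (st.1, PySem.Set.add st.2 (xc.1, PySem.Int.mod (yl.1 - 1) maxY))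
          else if xc.2 = 'd' then (st.1, PySem.Set.add st.2 (xc.1, PySem.Int.mod (yl.1 + 1) maxY))
          else if (xc.2 = 'l' ∨ xc.2 = 'r') ∧ maxX ≠ 0 then
            (st.1, PySem.Set.add st.2
              (PySem.Int.mod (xc.1 + (if xc.2 = 'r' then 1 else -1)) maxX, yl.1))
          else st) st) ((none, PySem.Set.empty) : Option (Int × Int) × PySem.Set (Int × Int))).1 with
  | none => rfl
  | some pp =>
    simp only [List.foldl_cons, List.foldl_nil, map_filter_cons, List.filter_nil, List.map_nil]
    simp only [move_step maxY maxX _ _ hhit]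
    have e1 : pp.1 + 0 = pp.1 := by ring
    have e2 : pp.2 + -1 = pp.2 - 1 := by ring
    have e3 : pp.1 + -1 = pp.1 - 1 := by ring
    have e4 : pp.2 + 0 = pp.2 := by ring
    simp only [e1, e2, e3, e4, List.nil_append, List.append_nil, List.append_assoc]
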